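-- pv_equiv track=rewrite | github.com/rstenvi/intrasploit | services/service_detection.py | remove_unused
-- ===== SOURCE A (Python) =====
-- def remove_unused(lines):
--     prefixes = (
--         "Probe TCP GetRequest",
--         "Probe TCP HTTPOptions",
--         "Probe TCP FourOhFourRequest",
--         "Probe TCP docker"
--     )
--     keep = False
--     ret = []
--     for line in lines:
--         if keep is True:
--             if line.startswith("Probe"):
--                 keep = False
--             else:
--                 ret.append(line)
--         if keep is False:
--             if line.startswith(prefixes):
--                 ret.append(line)
--                 keep = True
--     return ret
-- ===== SOURCE B (Python) =====
-- def remove_unused(lines):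
--     prefixes = (
--         "Probe TCP GetRequest",
--         "Probe TCP HTTPOptions",
--         "Probe TCP FourOhFourRequest",
--         "Probe TCP docker"
--     )
--     # pass 1: partition the lines into probe blocks (lines before the first
--     # "Probe" header are dropped)
--     blocks = []
--     cur = None
--     for line in lines:
--         if line.startswith("Probe"):
--             if cur is not None:
--                 blocks.append(cur)
--             cur = [line]
--         elif cur is not None:
--             cur.append(line)
--     if cur is not None:
--         blocks.append(cur)
--     # pass 2: keep only the blocks whose header is one of the wanted probes
--     ret = []
--     for block in blocks:
--         if block[0].startswith(prefixes):
--             ret.extend(block)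
--     return ret
-- ===== Notes on version B (the rewrite author's own statement) =====
-- stated objective: alternative
-- what changed: A's single interleaved keep/append state machine is replaced by two passes: first partition the lines into probe blocks (lines before the first 'Probe' header are dropped), then keep exactly the blocks whose header line starts with one of the wanted prefixes and flatten them.
import Mathlib
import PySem

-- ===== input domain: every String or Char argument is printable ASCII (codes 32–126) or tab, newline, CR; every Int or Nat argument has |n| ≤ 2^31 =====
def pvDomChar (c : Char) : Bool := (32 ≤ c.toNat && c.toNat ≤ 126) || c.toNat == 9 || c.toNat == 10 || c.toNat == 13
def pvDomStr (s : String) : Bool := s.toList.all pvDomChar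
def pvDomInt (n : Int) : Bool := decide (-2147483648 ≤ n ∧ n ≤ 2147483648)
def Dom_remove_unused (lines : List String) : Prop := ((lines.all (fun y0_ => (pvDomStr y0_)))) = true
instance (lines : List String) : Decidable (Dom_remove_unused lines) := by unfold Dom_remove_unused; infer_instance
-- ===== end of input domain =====

-- B re-decomposes A's interleaved keep/append state machine into two passes —
-- partition the lines into probe blocks, then keep the blocks with a wanted
-- header — same result, same O(n) cost (objective: alternative).


-- the `prefixes` tuple and `line.startswith(prefixes)` (shared by both ports)
def pvPrefixes : List String :=
  ["Probe TCP GetRequest", "Probe TCP HTTPOptions",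
   "Probe TCP FourOhFourRequest", "Probe TCP docker"]

def pvMatch (s : String) : Bool := pvPrefixes.any (fun p => PySem.Str.startswith s p)

-- ===== PORT A =====
-- A's loop body: first the `keep is True` branch, then the `keep is False` branch
def pvStepA (st : Bool × List String) (line : String) : Bool × List String :=
  let st1 :=
    if st.1 = true then
      (if PySem.Str.startswith line "Probe" then (false, st.2) else (true, st.2 ++ [line]))
    else st
  if st1.1 = false then
    (if pvMatch line then (true, st1.2 ++ [line]) else st1)
  else st1

def remove_unused (lines : List String) : List String :=
  (lines.foldl pvStepA (false, [])).2

-- ===== PORT B =====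
-- pass 1 loop body: state = (finished blocks, current block if any)
def pvStepB (st : List (List String) × Option (List String)) (line : String) :
    List (List String) × Option (List String) :=
  if PySem.Str.startswith line "Probe" then
    match st.2 with
    | some c => (st.1 ++ [c], some [line])
    | none   => (st.1, some [line])
  else
    match st.2 with
    | some c => (st.1, some (c ++ [line]))
    | none   => st

-- pass 2 loop body ([] is unreachable: every block starts with its header)
def pvBlockKeep (ret : List String) (b : List String) : List String :=
  match b with
  | [] => ret
  | h :: _ => if pvMatch h then ret ++ b else ret

def remove_unused_alt (lines : List String) : List String :=
  let st := lines.foldl pvStepB ([], none)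
  let blocks := match st.2 with
    | some c => st.1 ++ [c]
    | none   => st.1
  blocks.foldl pvBlockKeep []

-- ===== PRECONDITION & SPEC =====
def Spec_remove_unused (lines : List String) (out : List String) : Prop := out = remove_unused_alt lines
instance (lines : List String) (out : List String) : Decidable (Spec_remove_unused lines out) := by unfold Spec_remove_unused; infer_instance

-- ===== CLAIM (what is proved, stated in full; the proofs are below) =====
def Claim_equal_remove_unused : Prop := ∀ (lines : List String), Dom_remove_unused lines → Spec_remove_unused lines (remove_unused lines)

-- ===== LEMMAS AND PROOFS =====

-- the lines a block contributes to the output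
def pvBlockVal (b : List String) : List String :=
  match b with
  | [] => []
  | h :: _ => if pvMatch h then b else []

def pvOptVal : Option (List String) → List String
  | none => []
  | some c => pvBlockVal c

def pvCurKeep : Option (List String) → Bool
  | none => false
  | some [] => false
  | some (h :: _) => pvMatch h

-- the coupling invariant between A's state and B's pass-1 state
def pvInv (stA : Bool × List String) (stB : List (List String) × Option (List String)) : Prop :=
  stA.2 = stB.1.flatMap pvBlockVal ++ pvOptVal stB.2 ∧
  stA.1 = pvCurKeep stB.2 ∧
  (∀ c, stB.2 = some c → ∃ h t, c = h :: t ∧ PySem.Str.startswith h "Probe" = true)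

theorem pvMatch_probe (s : String) (h : pvMatch s = true) :
    PySem.Str.startswith s "Probe" = true := by
  simp only [pvMatch, pvPrefixes, List.any_cons, List.any_nil, Bool.or_eq_true,
    Bool.or_false, PySem.Str.startswith_eq, PySem.Chars.startswith_iff] at h ⊢
  rcases h with h | h | h | h <;>
    exact List.IsPrefix.trans (by decide) h

theorem pvFoldl_blockKeep (blocks : List (List String)) (acc : List String) :
    blocks.foldl pvBlockKeep acc = acc ++ blocks.flatMap pvBlockVal := by
  induction blocks generalizing acc with
  | nil => simp
  | cons b bs ih =>
      cases b with
      | nil => simp [pvBlockKeep, pvBlockVal, ih]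
      | cons h t =>
          by_cases hm : pvMatch h = true <;>
            simp [pvBlockKeep, pvBlockVal, hm, ih]

theorem pvInv_step (stA : Bool × List String)
    (stB : List (List String) × Option (List String)) (line : String)
    (hI : pvInv stA stB) : pvInv (pvStepA stA line) (pvStepB stB line) := by
  obtain ⟨keep, ret⟩ := stA
  obtain ⟨blocks, cur⟩ := stB
  obtain ⟨h1, h2, h3⟩ := hI
  simp only at h1 h2
  by_cases hP : PySem.Str.startswith line "Probe" = true
  · -- a new header: A decides by pvMatch line, B opens a new block
    have hP2 : PySem.Chars.startswith line.toList ['P','r','o','b','e'] = true := by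
      simpa [PySem.Str.startswith_eq] using hP
    have hkey : ∀ r : List String, pvStepA (keep, r) line =
        (pvMatch line, r ++ (if pvMatch line then [line] else [])) := by
      intro r
      cases keep <;> by_cases hm : pvMatch line = true <;>
        simp [pvStepA, hP2, hm]
    cases cur with
    | none =>
        refine ⟨?_, ?_, ?_⟩
        · simp [hkey, pvStepB, hP2, pvOptVal, pvBlockVal, h1]
        · simp [hkey, pvStepB, hP2, pvCurKeep]
        · intro c hc
          simp [pvStepB, hP2] at hc
          exact ⟨line, [], by simp [← hc, hP2]⟩
    | some c =>
        refine ⟨?_, ?_, ?_⟩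
        · simp [hkey, pvStepB, hP2, pvOptVal, pvBlockVal, h1]
        · simp [hkey, pvStepB, hP2, pvCurKeep]
        · intro c' hc
          simp [pvStepB, hP2] at hc
          exact ⟨line, [], by simp [← hc, hP2]⟩
  · -- an ordinary line: pvMatch line is false too
    have hP2 : PySem.Chars.startswith line.toList ['P','r','o','b','e'] = false := by
      have := hP
      simp [PySem.Str.startswith_eq, Bool.not_eq_true] at this
      simpa using this
    have hm : pvMatch line = false := by
      cases hml : pvMatch line with
      | false => rfl
      | true => exact absurd (pvMatch_probe line hml) hP
    have hkey : ∀ r : List String, pvStepA (keep, r) line =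
        (keep, r ++ (if keep then [line] else [])) := by
      intro r
      cases keep <;> simp [pvStepA, hP2, hm]
    cases cur with
    | none =>
        have hk2 : keep = false := by simpa [pvCurKeep] using h2
        subst hk2
        refine ⟨?_, ?_, ?_⟩
        · simp [hkey, pvStepB, hP2, h1, pvOptVal]
        · simp [hkey, pvStepB, hP2, pvCurKeep]
        · intro c hc
          simp [pvStepB, hP2] at hc
    | some c =>
        obtain ⟨h, t, rfl, hh⟩ := h3 c rfl
        have hk2 : keep = pvMatch h := by simpa [pvCurKeep] using h2
        subst hk2
        refine ⟨?_, ?_, ?_⟩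
        · by_cases hmh : pvMatch h = true
          · simp only [hmh] at hkey
            simp [hkey, pvStepB, hP2, h1, pvOptVal, pvBlockVal, hmh]
          · simp only [Bool.not_eq_true] at hmh
            simp only [hmh] at hkey
            simp [hkey, pvStepB, hP2, h1, pvOptVal, pvBlockVal, hmh]
        · simp [hkey, pvStepB, hP2, pvCurKeep]
        · intro c' hc
          simp [pvStepB, hP2] at hc
          have hh2 : PySem.Chars.startswith h.toList ['P','r','o','b','e'] = true := by
            simpa [PySem.Str.startswith_eq] using hh
          exact ⟨h, t ++ [line], by simp [← hc, hh2]⟩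

theorem pvInv_foldl (lines : List String) (stA : Bool × List String)
    (stB : List (List String) × Option (List String)) (hI : pvInv stA stB) :
    pvInv (lines.foldl pvStepA stA) (lines.foldl pvStepB stB) := by
  induction lines generalizing stA stB with
  | nil => exact hI
  | cons l ls ih => exact ih _ _ (pvInv_step _ _ l hI)

-- ===== VERDICT (by name: the statement is the Claim_ definition above) =====
theorem remove_unused_spec : Claim_equal_remove_unused := by
  intro lines _
  unfold Spec_remove_unused remove_unused remove_unused_alt
  have hI := pvInv_foldl lines (false, []) ([], none)
    ⟨by simp [pvOptVal], by simp [pvCurKeep], by intro c hc; cases hc⟩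
  obtain ⟨h1, _, h3⟩ := hI
  set st := lines.foldl pvStepB ([], none) with hst
  cases hcur : st.2 with
  | none => simp [hcur, pvFoldl_blockKeep, h1, pvOptVal]
  | some c =>
      obtain ⟨h, t, rfl, _⟩ := h3 c hcur
      by_cases hmh : pvMatch h = true <;>
        simp [hcur, pvFoldl_blockKeep, h1, pvOptVal, pvBlockVal, pvBlockKeep, hmh]
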